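-- pv_equiv track=rewrite | github.com/jhkeating/github-upload | decisionStump.py | find_response_vars
-- ===== SOURCE A (Python) =====
-- def find_response_vars(D):
-- 	lasts = [d[-1] for d in D]
-- 	variables = ["",""]
-- 	for item in lasts:
-- 		if variables[0] == "" and item != "" :
-- 			variables[0] = item
-- 		elif variables[0] != item:
-- 			variables[1] = item
-- 	return variables
-- ===== SOURCE B (Python) =====
-- def find_response_vars(D):
--     lasts = [d[-1] for d in D]
--     v0 = next((x for x in lasts if x != ""), "")
--     v1 = next((x for x in reversed(lasts) if x != v0), "")
--     return [v0, v1]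
-- ===== Notes on version B (the rewrite author's own statement) =====
-- stated objective: simpler
-- what changed: Replaces A's single stateful interleaved loop with two targeted scans: a forward scan for the first non-empty last value and a backward scan for the last value differing from it.
import Mathlib
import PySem

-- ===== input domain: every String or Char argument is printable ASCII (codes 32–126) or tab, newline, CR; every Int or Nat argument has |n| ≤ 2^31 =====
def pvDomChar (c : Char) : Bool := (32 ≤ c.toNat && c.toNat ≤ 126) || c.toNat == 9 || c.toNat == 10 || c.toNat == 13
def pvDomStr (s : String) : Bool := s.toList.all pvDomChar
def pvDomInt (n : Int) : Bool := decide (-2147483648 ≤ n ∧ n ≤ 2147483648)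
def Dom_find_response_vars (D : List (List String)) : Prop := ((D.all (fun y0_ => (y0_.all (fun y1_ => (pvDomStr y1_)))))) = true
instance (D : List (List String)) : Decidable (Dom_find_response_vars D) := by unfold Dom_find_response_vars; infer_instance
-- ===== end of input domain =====

-- B replaces A's single stateful loop by two targeted scans (forward for the first
-- non-empty last value, backward for the last value differing from it): simpler.

-- ===== PORT A =====
-- A's state: (variables[0], variables[1]) updated per item of lasts.
def pvStepA (v : String × String) (item : String) : String × String :=
  if v.1 = "" ∧ item ≠ "" then (item, v.2)
  else if v.1 ≠ item then (v.1, item)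
  else v

def find_response_vars (D : List (List String)) : List String :=
  let lasts := D.map (fun d => (PySem.List.pyGet? d (-1)).getD "")  -- d[-1]; Pre_ excludes empty rows (IndexError)
  let v := lasts.foldl pvStepA ("", "")
  [v.1, v.2]

-- ===== PORT B =====
def find_response_vars_alt (D : List (List String)) : List String :=
  let lasts := D.map (fun d => (PySem.List.pyGet? d (-1)).getD "")  -- d[-1]; Pre_ excludes empty rows (IndexError)
  let v0 := (lasts.find? (fun x => x != "")).getD ""
  let v1 := (lasts.reverse.find? (fun x => x != v0)).getD ""
  [v0, v1]

-- ===== PRECONDITION & SPEC =====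
-- Pre_ excludes inputs containing an empty row, on which both Pythons raise IndexError at d[-1].
def Pre_find_response_vars (D : List (List String)) : Prop := ∀ d ∈ D, d ≠ []
instance (D : List (List String)) : Decidable (Pre_find_response_vars D) := by unfold Pre_find_response_vars; infer_instance
def pvWitness_find_response_vars : List (List String) := [["x", "a"], ["y", ""], ["z", "b"]]

def Spec_find_response_vars (D : List (List String)) (out : List String) : Prop := out = find_response_vars_alt D
instance (D : List (List String)) (out : List String) : Decidable (Spec_find_response_vars D out) := by unfold Spec_find_response_vars; infer_instance

-- ===== CLAIM (what is proved, stated in full; the proofs are below) =====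
def Claim_equal_find_response_vars : Prop := ∀ (D : List (List String)), Dom_find_response_vars D → Pre_find_response_vars D → Spec_find_response_vars D (find_response_vars D)

-- ===== LEMMAS AND PROOFS =====


-- Append-on-the-right step for find?…getD (used to peel reverse (x::t) = t.reverse ++ [x]).
theorem find?_getD_snoc (p : String → Bool) (l : List String) (x d : String) :
    (((l ++ [x]).find? p).getD d) = ((l.find? p).getD (if p x then x else d)) := by
  induction l with
  | nil =>
    simp only [List.nil_append, List.find?]
    cases hp : p x <;> simp
  | cons h t ih =>
    simp only [List.cons_append, List.find?_cons]
    cases hp : p h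
    · simp [ih]
      split <;> simp
    · simp

theorem foldl_stepA_set (v0 w : String) (h : v0 ≠ "") (t : List String) :
    t.foldl pvStepA (v0, w) = (v0, ((t.reverse.find? (fun x => x != v0)).getD w)) := by
  induction t generalizing w with
  | nil => simp
  | cons x t ih =>
    simp only [List.foldl_cons, List.reverse_cons]
    rw [show pvStepA (v0, w) x = (v0, if (x != v0) then x else w) by
      unfold pvStepA
      rw [if_neg (by simp [h])]
      by_cases hx : v0 = x
      · subst hx; simp
      · simp [hx, Ne.symm hx]]
    rw [ih, find?_getD_snoc]

theorem foldl_stepA_main (L : List String) :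
    L.foldl pvStepA ("", "") =
      (((L.find? (fun x => x != "")).getD ""),
       ((L.reverse.find? (fun x => x != ((L.find? (fun x => x != "")).getD ""))).getD "")) := by
  induction L with
  | nil => simp
  | cons h t ih =>
    by_cases hh : h = ""
    · subst hh
      simp only [List.foldl_cons, List.reverse_cons]
      rw [show pvStepA ("", "") "" = ("", "") by simp [pvStepA]]
      rw [ih, find?_getD_snoc]
      have h1 : (List.find? (fun x => x != "") ("" :: t)) = t.find? (fun x => x != "") := by
        simp
      rw [h1]
      refine Prod.ext rfl ?_
      set v0 := ((t.find? (fun x => x != "")).getD "") with hv0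
      by_cases h0 : ("" : String) = v0
      · simp [← h0]
      · simp [bne, h0]
    · simp only [List.foldl_cons, List.reverse_cons]
      rw [show pvStepA ("", "") h = (h, "") by simp [pvStepA, hh]]
      rw [foldl_stepA_set h "" hh t, find?_getD_snoc]
      have hfind : List.find? (fun x => x != "") (h :: t) = some h := by
        simp [hh]
      rw [hfind]
      simp

-- ===== VERDICT (by name: the statement is the Claim_ definition above) =====
theorem find_response_vars_spec : Claim_equal_find_response_vars := by
  intro D _ _
  unfold Spec_find_response_vars find_response_vars find_response_vars_alt
  simp only [foldl_stepA_main]
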